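-- pv_equiv track=rewrite | github.com/florentx/pgqueue | pgqueue.py | quote_copy
-- ===== SOURCE A (Python) =====
-- def quote_copy(s, _special='\n\\\t\r'):
--     r"""Quote for COPY FROM command.  None is converted to \N."""
--     if s is None:
--         return r'\N'
--     s = str(s)
--     for char in _special:
--         if char in s:
--             return (s.replace('\\', '\\\\')
--                      .replace('\t', '\\t')
--                      .replace('\n', '\\n')
--                      .replace('\r', '\\r'))
--     return s
-- ===== SOURCE B (Python) =====
-- def quote_copy(s, _special='\n\\\t\r'):
--     r"""Quote for COPY FROM command.  None is converted to \N."""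
--     if s is None:
--         return '\\N'
--     s = str(s)
--     if not any(ch in _special for ch in s):
--         return s
--     out = []
--     for ch in s:
--         if ch == '\\':
--             out.append('\\\\')
--         elif ch == '\t':
--             out.append('\\t')
--         elif ch == '\n':
--             out.append('\\n')
--         elif ch == '\r':
--             out.append('\\r')
--         else:
--             out.append(ch)
--     return ''.join(out)
-- ===== Notes on version B (the rewrite author's own statement) =====
-- stated objective: alternative
-- what changed: Replaced the scan-over-special-chars with early return into four chained str.replace passes by a single per-character mapping pass (guarded by one any() presence check) that appends each char's escaped form to an accumulator and joins.
import Mathlib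
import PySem

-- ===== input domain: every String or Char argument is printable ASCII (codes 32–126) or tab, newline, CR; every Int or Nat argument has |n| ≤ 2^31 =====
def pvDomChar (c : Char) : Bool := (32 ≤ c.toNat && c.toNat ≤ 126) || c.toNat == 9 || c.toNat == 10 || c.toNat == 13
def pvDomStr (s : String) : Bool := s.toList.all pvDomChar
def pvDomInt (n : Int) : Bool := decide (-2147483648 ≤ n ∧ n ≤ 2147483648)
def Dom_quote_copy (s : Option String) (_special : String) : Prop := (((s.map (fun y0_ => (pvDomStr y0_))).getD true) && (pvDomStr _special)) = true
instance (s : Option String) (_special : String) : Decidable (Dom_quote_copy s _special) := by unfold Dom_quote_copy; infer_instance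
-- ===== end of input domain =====

-- B replaces A's special-char scan + four chained replace passes by one per-char mapping pass; equal results, similar cost (objective: alternative).

-- ===== PORT A =====
-- the chained replaces of A's early-return branch
def pvEscapeChain (t : List Char) : List Char :=
  PySem.Chars.replace
    (PySem.Chars.replace
      (PySem.Chars.replace
        (PySem.Chars.replace t ['\\'] ['\\', '\\'])
        ['\t'] ['\\', 't'])
      ['\n'] ['\\', 'n'])
    ['\r'] ['\\', 'r']

-- A's 'for char in _special' loop with its early return
def pvQuoteLoop (t : List Char) : List Char → List Char
  | [] => t
  | ch :: rest => if PySem.Chars.isIn [ch] t then pvEscapeChain t else pvQuoteLoop t rest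

def quote_copy (s : Option String) (_special : String) : String :=
  match s with
  | none => "\\N"
  | some str => String.ofList (pvQuoteLoop str.toList _special.toList)

-- ===== PORT B =====
-- B's per-char mapping (the if/elif chain of Source B)
def pvEscChar (c : Char) : List Char :=
  if c == '\\' then ['\\', '\\']
  else if c == '\t' then ['\\', 't']
  else if c == '\n' then ['\\', 'n']
  else if c == '\r' then ['\\', 'r']
  else [c]

def quote_copy_alt (s : Option String) (_special : String) : String :=
  match s with
  | none => "\\N"
  | some str =>
    let t := str.toList
    if !(t.any fun ch => PySem.Chars.isIn [ch] _special.toList) then str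
    else String.ofList ((t.map pvEscChar).flatten)

-- ===== PRECONDITION & SPEC =====
def Spec_quote_copy (s : Option String) (_special : String) (out : String) : Prop := out = quote_copy_alt s _special
instance (s : Option String) (_special : String) (out : String) : Decidable (Spec_quote_copy s _special out) := by unfold Spec_quote_copy; infer_instance

-- ===== CLAIM (what is proved, stated in full; the proofs are below) =====
def Claim_equal_quote_copy : Prop := ∀ (s : Option String) (_special : String), Dom_quote_copy s _special → Spec_quote_copy s _special (quote_copy s _special)

-- ===== LEMMAS AND PROOFS =====

theorem pv_go_single (o : Char) (new : List Char) :
    ∀ (l : List Char) (fuel : Nat) (acc : List Char), l.length ≤ fuel →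
      PySem.Chars.replace.go [o] new fuel l acc
        = acc.reverse ++ l.flatMap (fun c => if c == o then new else [c]) := by
  intro l
  induction l with
  | nil =>
      intro fuel acc _
      cases fuel <;> simp [PySem.Chars.replace.go]
  | cons c t ih =>
      intro fuel acc h
      cases fuel with
      | zero => simp at h
      | succ fuel =>
        rw [PySem.Chars.replace.go]
        by_cases hc : c == o
        · have hoc : o = c := (beq_iff_eq.mp hc).symm
          rw [if_pos (by simp [List.isPrefixOf, hoc])]
          rw [show List.drop [o].length (c :: t) = t from rfl]
          rw [ih fuel (new.reverse ++ acc) (by simpa using h)]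
          simp [List.flatMap_cons, hoc]
        · rw [if_neg (by simp [List.isPrefixOf]; intro he; exact absurd (beq_iff_eq.mpr he.symm) (by simp [hc]))]
          rw [ih fuel (c :: acc) (by simpa using h)]
          have : ¬ c = o := fun he => hc (beq_iff_eq.mpr he)
          simp [List.flatMap_cons, this]
theorem pv_replace_single (t : List Char) (o : Char) (new : List Char) :
    PySem.Chars.replace t [o] new = t.flatMap (fun c => if c == o then new else [c]) := by
  simp only [PySem.Chars.replace, List.isEmpty]
  rw [if_neg (by simp)]
  simpa using pv_go_single o new t t.length [] (le_refl _)

theorem pv_escapeChain_eq (t : List Char) :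
    pvEscapeChain t = (t.map pvEscChar).flatten := by
  unfold pvEscapeChain
  rw [pv_replace_single, pv_replace_single, pv_replace_single, pv_replace_single,
      List.flatMap_assoc, List.flatMap_assoc, List.flatMap_assoc]
  rw [List.flatten_eq_flatMap, List.flatMap_map]
  apply List.flatMap_congr
  intro c _
  by_cases h1 : c = '\\'
  · subst h1; decide
  · by_cases h2 : c = '\t'
    · subst h2; decide
    · by_cases h3 : c = '\n'
      · subst h3; decide
      · by_cases h4 : c = '\r'
        · subst h4; decide
        · simp [pvEscChar, h1, h2, h3, h4, List.flatMap_cons]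

theorem pv_singleton_isIn (c : Char) (t : List Char) :
    PySem.Chars.isIn [c] t = t.contains c := by
  rcases h : t.contains c with _ | _
  · rw [PySem.Chars.isIn_eq_false_iff]
    intro hinf
    have hm : c ∈ t := hinf.subset (by simp)
    rw [← List.contains_iff_mem, h] at hm
    exact Bool.false_ne_true hm
  · rw [PySem.Chars.isIn_iff_infix]
    have hm : c ∈ t := by rw [← List.contains_iff_mem, h]
    obtain ⟨l1, l2, rfl⟩ := List.append_of_mem hm
    exact ⟨l1, l2, by simp⟩

theorem pv_any_comm (t sp : List Char) :
    (sp.any fun ch => PySem.Chars.isIn [ch] t) = (t.any fun ch => PySem.Chars.isIn [ch] sp) := by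
  simp only [pv_singleton_isIn]
  rw [Bool.eq_iff_iff]
  simp only [List.any_eq_true, List.contains_iff_mem]
  exact ⟨fun ⟨c, h1, h2⟩ => ⟨c, h2, h1⟩, fun ⟨c, h1, h2⟩ => ⟨c, h2, h1⟩⟩

theorem pv_loop_eq (t : List Char) (sp : List Char) :
    pvQuoteLoop t sp = if sp.any (fun ch => PySem.Chars.isIn [ch] t) then pvEscapeChain t else t := by
  induction sp with
  | nil => simp [pvQuoteLoop]
  | cons ch rest ih =>
      simp only [pvQuoteLoop, List.any_cons]
      by_cases h : PySem.Chars.isIn [ch] t = true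
      · simp [h]
      · simp only [Bool.not_eq_true] at h
        simp [h, ih]

-- ===== VERDICT (by name: the statement is the Claim_ definition above) =====
theorem quote_copy_spec : Claim_equal_quote_copy := by
  intro s _special _
  unfold Spec_quote_copy quote_copy quote_copy_alt
  cases s with
  | none => rfl
  | some str =>
      simp only
      rw [pv_loop_eq, pv_any_comm]
      by_cases h : (str.toList.any fun ch => PySem.Chars.isIn [ch] _special.toList) = true
      · simp [h, pv_escapeChain_eq]
      · simp only [Bool.not_eq_true] at h
        simp [h]
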